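-- pv_equiv track=rewrite | github.com/paullozen/autofx | srt_generator.py | chunk_sentences
-- ===== SOURCE A (Python) =====
-- def chunk_sentences(sentences: list[str], per_timestamp: int) -> list[str]:
--     chunk_size = max(1, per_timestamp)
--     block, grouped = [], []
--     for sentence in sentences:
--         if not sentence:
--             continue
--         block.append(sentence)
--         if len(block) >= chunk_size:
--             grouped.append(" ".join(block).strip())
--             block = []
--     if block:
--         grouped.append(" ".join(block).strip())
--     return grouped
-- ===== SOURCE B (Python) =====
-- def chunk_sentences(sentences: list[str], per_timestamp: int) -> list[str]:
--     kept = [s for s in sentences if s]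
--     k = max(1, per_timestamp)
--     out = []
--     while kept:
--         out.append(" ".join(kept[:k]).strip())
--         kept = kept[k:]
--     return out
-- ===== Notes on version B (the rewrite author's own statement) =====
-- stated objective: simpler
-- what changed: Replaces the per-element accumulator with a per-element flush branch by a two-phase decomposition: filter out falsy sentences once, then slice the kept list into fixed-size chunks of max(1, per_timestamp).
import Mathlib
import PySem

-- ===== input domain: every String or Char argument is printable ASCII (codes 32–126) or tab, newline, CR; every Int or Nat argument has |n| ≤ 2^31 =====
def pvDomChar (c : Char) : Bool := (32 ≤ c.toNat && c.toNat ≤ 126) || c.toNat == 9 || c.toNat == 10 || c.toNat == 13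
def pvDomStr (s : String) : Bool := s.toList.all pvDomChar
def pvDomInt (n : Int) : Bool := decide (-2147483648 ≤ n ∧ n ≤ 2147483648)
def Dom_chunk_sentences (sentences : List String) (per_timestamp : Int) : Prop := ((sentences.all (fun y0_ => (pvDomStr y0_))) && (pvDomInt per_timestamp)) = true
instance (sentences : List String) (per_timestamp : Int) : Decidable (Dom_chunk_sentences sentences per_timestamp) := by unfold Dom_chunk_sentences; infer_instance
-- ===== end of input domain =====

-- B replaces A's running accumulator + flush branch by a filter-then-slice decomposition (same cost; simpler).

-- ===== PORT A =====
-- " ".join(block).strip()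
def pvJoinStrip (block : List String) : String :=
  PySem.Str.strip (PySem.Str.join " " block)

-- one iteration of A's `for sentence in sentences` loop; state = (block, grouped)
def pvStepA (chunk_size : Int) (st : List String × List String) (sentence : String) :
    List String × List String :=
  if sentence = "" then st
  else
    let block := st.1 ++ [sentence]
    if (block.length : Int) ≥ chunk_size then ([], st.2 ++ [pvJoinStrip block])
    else (block, st.2)

def chunk_sentences (sentences : List String) (per_timestamp : Int) : List String :=
  let chunk_size : Int := max 1 per_timestamp
  let st := sentences.foldl (pvStepA chunk_size) ([], [])
  if st.1 ≠ [] then st.2 ++ [pvJoinStrip st.1] else st.2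

-- ===== PORT B =====
-- the `while kept:` loop: emit join(kept[:k]).strip(), continue with kept[k:] (k ≥ 1)
def pvChunksB (k : Nat) : List String → List String
  | [] => []
  | s :: rest => pvJoinStrip ((s :: rest).take k) :: pvChunksB k (rest.drop (k - 1))
  termination_by l => l.length
  decreasing_by simp

def chunk_sentences_alt (sentences : List String) (per_timestamp : Int) : List String :=
  let kept := sentences.filter (fun s => s ≠ "")
  let k : Nat := (max 1 per_timestamp).toNat
  pvChunksB k kept

-- ===== PRECONDITION & SPEC =====
def Spec_chunk_sentences (sentences : List String) (per_timestamp : Int) (out : List String) : Prop := out = chunk_sentences_alt sentences per_timestamp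
instance (sentences : List String) (per_timestamp : Int) (out : List String) : Decidable (Spec_chunk_sentences sentences per_timestamp out) := by unfold Spec_chunk_sentences; infer_instance

-- ===== CLAIM (what is proved, stated in full; the proofs are below) =====
def Claim_equal_chunk_sentences : Prop := ∀ (sentences : List String) (per_timestamp : Int), Dom_chunk_sentences sentences per_timestamp → Spec_chunk_sentences sentences per_timestamp (chunk_sentences sentences per_timestamp)

-- ===== LEMMAS AND PROOFS =====

-- A's result after folding over `kept` from state (block, grouped), including the final flush
def pvAfterA (cs : Int) (block grouped kept : List String) : List String :=
  let st := kept.foldl (pvStepA cs) (block, grouped)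
  if st.1 ≠ [] then st.2 ++ [pvJoinStrip st.1] else st.2

-- A's block sequence from a partial block, element at a time (mirrors A's flush条件), f applied
def pvChunksP (k : Nat) (block : List String) : List String → List String
  | [] => if block = [] then [] else [pvJoinStrip block]
  | s :: rest =>
      if k ≤ block.length + 1 then pvJoinStrip (block ++ [s]) :: pvChunksP k [] rest
      else pvChunksP k (block ++ [s]) rest

theorem pvStepA_empty (cs : Int) (st : List String × List String) : pvStepA cs st "" = st := by
  simp [pvStepA]

-- empty sentences are skipped: folding over `sentences` = folding over the filtered list
theorem foldl_stepA_filter (cs : Int) (sentences : List String) (st : List String × List String) :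
    sentences.foldl (pvStepA cs) st = (sentences.filter (fun s => s ≠ "")).foldl (pvStepA cs) st := by
  induction sentences generalizing st with
  | nil => rfl
  | cons s rest ih =>
      by_cases hs : s = "" <;> simp [hs, List.foldl, pvStepA_empty, ih]

theorem pvAfterA_eq_chunksP (cs : Int) (h1 : 1 ≤ cs) (kept : List String)
    (hne : ∀ s ∈ kept, s ≠ "") :
    ∀ block grouped, block.length < cs.toNat →
      pvAfterA cs block grouped kept = grouped ++ pvChunksP cs.toNat block kept := by
  induction kept with
  | nil =>
      intro block grouped _
      by_cases hb : block = [] <;> simp [pvAfterA, pvChunksP, hb]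
  | cons s rest ih =>
      intro block grouped hlt
      have hs : s ≠ "" := hne s (by simp)
      have hne' : ∀ t ∈ rest, t ≠ "" := fun t ht => hne t (by simp [ht])
      by_cases hfl : cs.toNat ≤ block.length + 1
      · have hge : ((block ++ [s]).length : Int) ≥ cs := by simp; omega
        have : pvAfterA cs block grouped (s :: rest)
            = pvAfterA cs [] (grouped ++ [pvJoinStrip (block ++ [s])]) rest := by
          simp only [pvAfterA, List.foldl, pvStepA, hs, if_pos hge]
          simp
        rw [this, ih hne' [] _ (by simp; omega), pvChunksP,
          if_pos hfl, List.append_assoc]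
        rfl
      · have hge : ¬ ((block ++ [s]).length : Int) ≥ cs := by simp; omega
        have : pvAfterA cs block grouped (s :: rest)
            = pvAfterA cs (block ++ [s]) grouped rest := by
          simp only [pvAfterA, List.foldl, pvStepA, hs, if_neg hge]
          simp
        rw [this, ih hne' (block ++ [s]) grouped (by simp; omega), pvChunksP, if_neg hfl]

theorem pvChunksB_cons (k : Nat) (hk : 1 ≤ k) (l : List String) (hl : l ≠ []) :
    pvChunksB k l = pvJoinStrip (l.take k) :: pvChunksB k (l.drop k) := by
  cases l with
  | nil => exact absurd rfl hl
  | cons s rest =>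
      rw [pvChunksB]
      congr 1
      cases k with
      | zero => omega
      | succ n => simp

theorem pvChunksP_eq_chunksB (k : Nat) (hk : 1 ≤ k) (kept : List String) :
    ∀ block, block.length < k → pvChunksP k block kept = pvChunksB k (block ++ kept) := by
  induction kept with
  | nil =>
      intro block hlt
      by_cases hb : block = []
      · simp [pvChunksP, hb, pvChunksB]
      · rw [pvChunksP, if_neg hb, List.append_nil, pvChunksB_cons k hk block hb,
          List.take_of_length_le hlt.le, List.drop_of_length_le hlt.le]
        simp [pvChunksB]
  | cons s rest ih =>
      intro block hlt
      by_cases hfl : k ≤ block.length + 1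
      · have hk' : k = block.length + 1 := by omega
        have hsplit : block ++ s :: rest = (block ++ [s]) ++ rest := by simp
        rw [pvChunksP, if_pos hfl, ih [] (by simp; omega),
          pvChunksB_cons k hk (block ++ s :: rest) (by simp), hk', hsplit,
          List.take_left' (by simp), List.drop_left' (by simp)]
        simp
      · rw [pvChunksP, if_neg hfl, ih (block ++ [s]) (by simp; omega), List.append_assoc]
        rfl

-- ===== VERDICT (by name: the statement is the Claim_ definition above) =====
theorem chunk_sentences_spec : Claim_equal_chunk_sentences := by
  intro sentences per_timestamp _
  have h1 : (1 : Int) ≤ max 1 per_timestamp := le_max_left _ _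
  have hfil : ∀ s ∈ sentences.filter (fun s => s ≠ ""), s ≠ "" := by
    intro s hs; simpa using (List.mem_filter.mp hs).2
  have hA := pvAfterA_eq_chunksP (max 1 per_timestamp) h1 _ hfil [] [] (by simp only [List.length_nil]; omega)
  have hB := pvChunksP_eq_chunksB (max 1 per_timestamp).toNat (by omega)
      (sentences.filter (fun s => s ≠ "")) [] (by simp only [List.length_nil]; omega)
  unfold Spec_chunk_sentences chunk_sentences chunk_sentences_alt
  dsimp only
  rw [foldl_stepA_filter]
  refine Eq.trans ?_ (hB ▸ (List.nil_append _ ▸ hA))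
  rfl
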